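-- pv_equiv track=rewrite | github.com/devmshan/algorithm-python | 3st_week/03_07_get_receiver_top_orders.py | get_receiver_top_order
-- ===== SOURCE A (Python) =====
-- def get_receiver_top_order(heights):
--     answer = [0] * len(heights) # [0,0,0,0,0]
--
--     for i in range(len(heights)-1,0,-1):
--         for j in range(i-1,-1,-1):
--             if heights[i] <= heights[j]:
--                 answer[i] = j + 1
--                 break
--
--     return answer
-- ===== SOURCE B (Python) =====
-- def get_receiver_top_order(heights):
--     # Monotonic stack, one pass: for each element, the nearest index to the
--     # left holding a value >= it (1-based), else 0.
--     answer = []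
--     stack = []  # indices; heights at stored indices are non-increasing bottom-to-top... non-decreasing toward bottom
--     for i, h in enumerate(heights):
--         while stack and heights[stack[-1]] < h:
--             stack.pop()
--         answer.append(stack[-1] + 1 if stack else 0)
--         stack.append(i)
--     return answer
-- ===== Notes on version B (the rewrite author's own statement) =====
-- stated objective: faster
-- what changed: Replaced the backward nested scan (for each i, scan left until a value >= heights[i]) by a single forward pass with a monotonic stack of indices.
import Mathlib
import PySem

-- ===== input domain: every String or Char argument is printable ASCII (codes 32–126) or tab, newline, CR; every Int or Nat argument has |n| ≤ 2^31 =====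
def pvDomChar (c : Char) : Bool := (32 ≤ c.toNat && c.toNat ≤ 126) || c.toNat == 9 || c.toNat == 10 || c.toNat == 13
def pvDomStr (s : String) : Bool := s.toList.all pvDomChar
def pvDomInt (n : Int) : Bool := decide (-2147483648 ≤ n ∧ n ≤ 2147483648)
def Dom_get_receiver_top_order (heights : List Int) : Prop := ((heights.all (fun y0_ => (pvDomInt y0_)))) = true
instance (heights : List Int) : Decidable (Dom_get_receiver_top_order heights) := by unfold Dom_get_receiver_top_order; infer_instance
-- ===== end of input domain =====

-- B replaces A's backward nested scan by a single forward pass with a monotonic stack (O(n) instead of O(n^2)).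

-- ===== PORT A =====
-- inner loop 'for j in range(i-1,-1,-1): if heights[i] <= heights[j]: answer[i] = j+1; break'
-- (indices produced by the ranges are always in bounds, so pyGetD/pySetD are exact here)
def pvInnerA (heights : List Int) (i : Int) (ans : List Int) : List Int → List Int
  | [] => ans
  | j :: rest =>
    if PySem.List.pyGetD heights i 0 ≤ PySem.List.pyGetD heights j 0 then
      PySem.List.pySetD ans i (j + 1)
    else pvInnerA heights i ans rest

def get_receiver_top_order (heights : List Int) : List Int :=
  let answer := List.replicate heights.length (0 : Int)
  (PySem.List.pyRange ((heights.length : Int) - 1) 0 (-1)).foldl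
    (fun ans i => pvInnerA heights i ans (PySem.List.pyRange (i - 1) (-1) (-1))) answer

-- ===== PORT B =====
-- 'while stack and heights[stack[-1]] < h: stack.pop()'  (stack top = list head)
def pvPop (heights : List Int) (h : Int) : List Int → List Int
  | [] => []
  | t :: rest => if PySem.List.pyGetD heights t 0 < h then pvPop heights h rest else t :: rest

def get_receiver_top_order_alt (heights : List Int) : List Int :=
  ((PySem.List.enumerate heights).foldl
    (fun (st : List Int × List Int) p =>
      let stack := pvPop heights p.2 st.1
      (p.1 :: stack, st.2 ++ [match stack with | [] => 0 | t :: _ => t + 1]))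
    ([], [])).2

-- ===== PRECONDITION & SPEC =====
def Spec_get_receiver_top_order (heights : List Int) (out : List Int) : Prop := out = get_receiver_top_order_alt heights
instance (heights : List Int) (out : List Int) : Decidable (Spec_get_receiver_top_order heights out) := by unfold Spec_get_receiver_top_order; infer_instance

-- ===== CLAIM (what is proved, stated in full; the proofs are below) =====
def Claim_equal_get_receiver_top_order : Prop := ∀ (heights : List Int), Dom_get_receiver_top_order heights → Spec_get_receiver_top_order heights (get_receiver_top_order heights)

-- ===== LEMMAS AND PROOFS =====

-- the value both programs compute at position i: 1 + the largest j < i with hs[j] >= hs[i], else 0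
def pvBest (hs : List Int) (i : Nat) : Int :=
  match ((List.range i).reverse).find? (fun j => decide (hs.getD i 0 ≤ hs.getD j 0)) with
  | some j => (j : Int) + 1
  | none => 0

-- j survives on the stack after the first i elements iff no later already-seen element exceeds it
def pvKeep (hs : List Int) (i j : Nat) : Bool :=
  decide (∀ k, k < i → j < k → hs.getD k 0 ≤ hs.getD j 0)

lemma pvBest_zero (hs : List Int) : pvBest hs 0 = 0 := by simp [pvBest]

-- countdown range as a mapped reversed List.range
lemma pyRange_countdown (m : Nat) :
    PySem.List.pyRange ((m : Int) - 1) (-1) (-1) = ((List.range m).reverse).map (fun k => Int.ofNat k) := by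
  induction m with
  | zero => simp [PySem.List.pyRange_neg_one_eq_nil]
  | succ m ih =>
    rw [show ((m + 1 : Nat) : Int) - 1 = (m : Int) by push_cast; ring,
        PySem.List.pyRange_neg_one_cons (by omega),
        show (m : Int) - 1 = ((m : Nat) : Int) - 1 by norm_num, ih,
        List.range_succ]
    simp

lemma innerA_find (hs : List Int) (m : Nat) (ans : List Int) (L : List Nat) :
    pvInnerA hs (m : Int) ans (L.map (fun k => Int.ofNat k)) =
      match L.find? (fun j => decide (hs.getD m 0 ≤ hs.getD j 0)) with
      | some j => ans.set m ((j : Int) + 1)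
      | none => ans := by
  induction L with
  | nil => simp [pvInnerA]
  | cons j rest ih =>
    rw [List.map_cons]
    simp only [pvInnerA, Int.ofNat_eq_natCast, PySem.List.pyGetD_natCast, PySem.List.pySetD_natCast]
    rw [List.find?_cons]
    by_cases h : hs.getD m 0 ≤ hs.getD j 0
    · rw [if_pos h, decide_eq_true h]
    · simp only [Int.ofNat_eq_natCast] at ih
      rw [if_neg h, decide_eq_false h, ih]

lemma foldA_getElem (hs : List Int) (m : Nat) (ans : List Int)
    (hz : ∀ k, 1 ≤ k → k ≤ m → ans[k]? = some 0) :
    ∀ k, ((PySem.List.pyRange (m : Int) 0 (-1)).foldl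
      (fun ans i => pvInnerA hs i ans (PySem.List.pyRange (i - 1) (-1) (-1))) ans)[k]? =
      if 1 ≤ k ∧ k ≤ m then some (pvBest hs k) else ans[k]? := by
  induction m generalizing ans with
  | zero =>
    intro k
    rw [PySem.List.pyRange_neg_one_eq_nil (by omega)]
    simp only [List.foldl_nil]
    have : ¬ (1 ≤ k ∧ k ≤ 0) := by omega
    rw [if_neg this]
  | succ m ih =>
    intro k
    rw [PySem.List.pyRange_neg_one_cons (by omega), List.foldl_cons,
        show ((m + 1 : Nat) : Int) - 1 = (m : Int) by push_cast; ring]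
    have hlen : m + 1 < ans.length := (List.getElem?_eq_some_iff.mp (hz (m + 1) (by omega) le_rfl)).1
    have hstep : pvInnerA hs ((m + 1 : Nat) : Int) ans (PySem.List.pyRange ((m : Nat) : Int) (-1) (-1)) =
        ans.set (m + 1) (pvBest hs (m + 1)) := by
      rw [show ((m : Nat) : Int) = ((m + 1 : Nat) : Int) - 1 by push_cast; ring,
          pyRange_countdown (m + 1), innerA_find]
      unfold pvBest
      cases hfind : ((List.range (m + 1)).reverse).find? (fun j => decide (hs.getD (m + 1) 0 ≤ hs.getD j 0)) with
      | none =>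
        apply List.ext_getElem?
        intro n
        rw [List.getElem?_set]
        by_cases hn : m + 1 = n
        · subst hn; rw [if_pos rfl, if_pos hlen, hz (m + 1) (by omega) le_rfl]
        · rw [if_neg hn]
      | some j => rfl
    rw [hstep, ih]
    · by_cases h1 : 1 ≤ k ∧ k ≤ m
      · rw [if_pos h1, if_pos ⟨h1.1, by omega⟩]
      · rw [if_neg h1, List.getElem?_set]
        by_cases h2 : k = m + 1
        · subst h2
          rw [if_pos rfl, if_pos hlen, if_pos ⟨by omega, le_rfl⟩]
        · rw [if_neg (fun h => h2 h.symm), if_neg (by omega)]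
    · intro k' h1 h2
      rw [List.getElem?_set, if_neg (by omega)]
      exact hz k' h1 (by omega)

lemma portA_eq_map (hs : List Int) :
    get_receiver_top_order hs = (List.range hs.length).map (pvBest hs) := by
  unfold get_receiver_top_order
  cases hn : hs.length with
  | zero =>
    rw [PySem.List.pyRange_neg_one_eq_nil (by omega)]
    simp
  | succ n =>
    have hfold := foldA_getElem hs n (List.replicate (n + 1) (0 : Int))
      (fun k h1 h2 => by rw [List.getElem?_replicate_of_lt (by omega)])
    apply List.ext_getElem?
    intro k
    rw [show ((n + 1 : Nat) : Int) - 1 = (n : Int) by push_cast; ring, hfold k]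
    by_cases h1 : 1 ≤ k ∧ k ≤ n
    · rw [if_pos h1, List.getElem?_map, List.getElem?_range (by omega)]
      rfl
    · rw [if_neg h1]
      by_cases h0 : k = 0
      · subst h0
        rw [List.getElem?_replicate_of_lt (by omega), List.getElem?_map,
            List.getElem?_range (by omega)]
        simp [pvBest_zero]
      · have hk : n + 1 ≤ k := by omega
        rw [List.getElem?_map, List.getElem?_eq_none (by simpa using hk),
            List.getElem?_eq_none (by simpa using hk)]
        rfl

lemma pop_filter (hs : List Int) (x : Int) (l : List Nat)
    (hp : l.Pairwise (fun a b => hs.getD a 0 ≤ hs.getD b 0)) :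
    pvPop hs x (l.map (fun k => Int.ofNat k)) =
      (l.filter (fun t => decide (x ≤ hs.getD t 0))).map (fun k => Int.ofNat k) := by
  induction l with
  | nil => rfl
  | cons t rest ih =>
    rw [List.pairwise_cons] at hp
    rw [List.map_cons]
    simp only [pvPop, Int.ofNat_eq_natCast, PySem.List.pyGetD_natCast]
    rw [List.filter_cons]
    by_cases h : hs.getD t 0 < x
    · rw [if_pos h, decide_eq_false (by omega)]
      simp only [Int.ofNat_eq_natCast] at ih
      simpa using ih hp.2
    · rw [if_neg h, decide_eq_true (by omega)]
      have : rest.filter (fun t => decide (x ≤ hs.getD t 0)) = rest :=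
        List.filter_eq_self.mpr (fun b hb => decide_eq_true (le_trans (by omega) (hp.1 b hb)))
      rw [if_pos rfl, this, List.map_cons]

lemma findStrength (hs : List Int) (i : Nat) :
    ∀ m, m ≤ i → (∀ k, m ≤ k → k < i → ¬ (hs.getD i 0 ≤ hs.getD k 0)) →
    ((List.range m).reverse).find? (fun j => pvKeep hs i j && decide (hs.getD i 0 ≤ hs.getD j 0)) =
    ((List.range m).reverse).find? (fun j => decide (hs.getD i 0 ≤ hs.getD j 0)) := by
  intro m
  induction m with
  | zero => intro _ _; rfl
  | succ m ihm =>
    intro hmi hout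
    rw [List.range_succ, List.reverse_append]
    simp only [List.reverse_singleton, List.singleton_append, List.find?_cons]
    by_cases h : hs.getD i 0 ≤ hs.getD m 0
    · have hkeep : pvKeep hs i m = true := by
        unfold pvKeep
        apply decide_eq_true
        intro k hk hmk
        have := hout k (by omega) hk
        omega
      rw [decide_eq_true h, hkeep]
      rfl
    · rw [decide_eq_false h, Bool.and_false]
      exact ihm (by omega) (fun k hk1 hk2 => by
        rcases Nat.eq_or_lt_of_le hk1 with rfl | hlt
        · exact h
        · exact hout k (by omega) hk2)

lemma foldB_inv (hs : List Int) :
    ∀ i, i ≤ hs.length →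
    (PySem.List.enumerate (hs.take i)).foldl
      (fun (st : List Int × List Int) p =>
        let stack := pvPop hs p.2 st.1
        (p.1 :: stack, st.2 ++ [match stack with | [] => 0 | t :: _ => t + 1]))
      ([], []) =
    ((((List.range i).filter (pvKeep hs i)).reverse).map (fun j => Int.ofNat j),
     (List.range i).map (pvBest hs)) := by
  intro i
  induction i with
  | zero => intro _; rfl
  | succ i ih =>
    intro hle
    have hi : i < hs.length := by omega
    have hx : hs[i] = hs.getD i 0 := (List.getD_eq_getElem hs 0 hi).symm
    rw [List.take_add_one, List.getElem?_eq_getElem hi]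
    simp only [Option.toList_some]
    rw [PySem.List.enumerate_append, List.foldl_append, ih (by omega)]
    have hlt : (hs.take i).length = i := by simp [List.length_take]; omega
    rw [hlt, PySem.List.enumerate_cons, PySem.List.enumerate_nil]
    rw [List.foldl_cons, List.foldl_nil]
    -- the kept-at-i stack is ordered with values nondecreasing toward the bottom
    have hpair : (((List.range i).filter (pvKeep hs i)).reverse).Pairwise
        (fun a b => hs.getD a 0 ≤ hs.getD b 0) := by
      rw [List.pairwise_reverse]
      refine List.Pairwise.imp_of_mem ?_ (List.Pairwise.filter _ List.pairwise_lt_range)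
      intro a b ha hb hab
      have hka : pvKeep hs i a = true := List.of_mem_filter ha
      have hbi : b < i := List.mem_range.mp (List.mem_of_mem_filter hb)
      exact of_decide_eq_true hka b hbi hab
    -- popping turns the kept-at-i stack into the kept-at-(i+1) stack (minus i itself)
    have hcong : ∀ j ∈ (List.range i).filter (pvKeep hs i),
        (decide (hs.getD i 0 ≤ hs.getD j 0)) = pvKeep hs (i + 1) j := by
      intro j hj
      have hji : j < i := List.mem_range.mp (List.mem_of_mem_filter hj)
      have hkj : pvKeep hs i j = true := List.of_mem_filter hj
      by_cases h : hs.getD i 0 ≤ hs.getD j 0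
      · rw [decide_eq_true h]
        exact (decide_eq_true (fun k hk1 hk2 => by
          rcases Nat.lt_succ_iff_lt_or_eq.mp hk1 with hlt | rfl
          · exact of_decide_eq_true hkj k hlt hk2
          · exact h)).symm
      · rw [decide_eq_false h]
        exact (decide_eq_false (fun hall => h (hall i (by omega) hji))).symm
    have hfilter2 : ((List.range i).filter (pvKeep hs i)).filter
          (fun t => decide (hs.getD i 0 ≤ hs.getD t 0)) =
        (List.range i).filter (pvKeep hs (i + 1)) := by
      rw [List.filter_congr hcong]
      rw [List.filter_filter]
      apply List.filter_congr
      intro j hj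
      have hji : j < i := List.mem_range.mp hj
      by_cases hk : pvKeep hs (i + 1) j = true
      · have hki : pvKeep hs i j = true := decide_eq_true (fun k hk1 hk2 =>
          of_decide_eq_true hk k (by omega) hk2)
        rw [hk, hki]
        rfl
      · rw [Bool.not_eq_true] at hk
        rw [hk, Bool.false_and]
    have hpop : pvPop hs (hs.getD i 0)
          ((((List.range i).filter (pvKeep hs i)).reverse).map (fun j => Int.ofNat j)) =
        (((List.range i).filter (pvKeep hs (i + 1))).reverse).map (fun j => Int.ofNat j) := by
      rw [pop_filter hs _ _ hpair, List.filter_reverse, hfilter2]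
    -- the new top of stack (if any) is exactly the nearest left index with value >= hs[i]
    have hfind := findStrength hs i i le_rfl (fun k hk1 hk2 => absurd hk2 (by omega))
    have hpt : ∀ j ∈ List.range i, pvKeep hs (i + 1) j =
        (pvKeep hs i j && decide (hs.getD i 0 ≤ hs.getD j 0)) := by
      intro j hj
      have hji : j < i := List.mem_range.mp hj
      by_cases hk : pvKeep hs (i + 1) j = true
      · have h1 : pvKeep hs i j = true := decide_eq_true (fun k a b =>
          of_decide_eq_true hk k (by omega) b)
        have h2 : hs.getD i 0 ≤ hs.getD j 0 := of_decide_eq_true hk i (by omega) hji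
        rw [hk, h1, decide_eq_true h2]
        rfl
      · rw [Bool.not_eq_true] at hk
        rw [hk]
        cases hpk : pvKeep hs i j
        · rfl
        · by_cases h2 : hs.getD i 0 ≤ hs.getD j 0
          · have htrue : pvKeep hs (i + 1) j = true := decide_eq_true (fun k a b => by
              rcases Nat.lt_succ_iff_lt_or_eq.mp a with hlt | rfl
              · exact of_decide_eq_true hpk k hlt b
              · exact h2)
            rw [hk] at htrue
            exact absurd htrue Bool.false_ne_true
          · rw [decide_eq_false h2, Bool.and_false]
    have hflt : ((List.range i).filter (pvKeep hs (i + 1))).reverse =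
        ((List.range i).reverse).filter
          (fun j => pvKeep hs i j && decide (hs.getD i 0 ≤ hs.getD j 0)) := by
      rw [List.filter_reverse]
      exact congrArg List.reverse (List.filter_congr hpt)
    have hans : (match (((List.range i).filter (pvKeep hs (i + 1))).reverse).map
          (fun j => Int.ofNat j) with
        | [] => (0 : Int) | t :: _ => t + 1) = pvBest hs i := by
      rw [hflt]
      unfold pvBest
      cases hf : ((List.range i).reverse).find?
          (fun j => decide (hs.getD i 0 ≤ hs.getD j 0)) with
      | none =>
        have : ((List.range i).reverse).filter
            (fun j => pvKeep hs i j && decide (hs.getD i 0 ≤ hs.getD j 0)) = [] := by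
          rw [List.filter_eq_nil_iff]
          intro a ha
          exact List.find?_eq_none.mp (hfind.trans hf) a ha
        rw [this]
        rfl
      | some j =>
        have hhead : (((List.range i).reverse).filter
            (fun j => pvKeep hs i j && decide (hs.getD i 0 ≤ hs.getD j 0))).head? = some j := by
          rw [List.head?_filter, hfind, hf]
        cases hfl : ((List.range i).reverse).filter
            (fun j => pvKeep hs i j && decide (hs.getD i 0 ≤ hs.getD j 0)) with
        | nil => rw [hfl] at hhead; simp at hhead
        | cons a t =>
          rw [hfl] at hhead
          simp at hhead
          subst hhead
          rfl
    -- assemble the pair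
    simp only [zero_add, hx, hpop]
    refine Prod.ext ?_ ?_
    · show Int.ofNat i :: _ = _
      rw [List.range_succ, List.filter_append]
      have hki : pvKeep hs (i + 1) i = true := decide_eq_true (fun k hk1 hk2 => by omega)
      simp [hki]
    · show _ ++ [_] = _
      rw [hans, List.range_succ, List.map_append, List.map_singleton]
lemma portB_eq_map (hs : List Int) :
    get_receiver_top_order_alt hs = (List.range hs.length).map (pvBest hs) := by
  have := foldB_inv hs hs.length le_rfl
  rw [List.take_length] at this
  rw [get_receiver_top_order_alt, this]

-- ===== VERDICT (by name: the statement is the Claim_ definition above) =====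
theorem get_receiver_top_order_spec : Claim_equal_get_receiver_top_order := by
  intro hs _
  unfold Spec_get_receiver_top_order
  rw [portA_eq_map, portB_eq_map]
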